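-- pv_equiv track=rewrite | github.com/TheGermanCodeMachine/moral_rl | interpretability/counterfactual_trajectories.py | sort_args
-- ===== SOURCE A (Python) =====
-- def sort_args(arg_str):
--     attr_map = {
--         'p': 0,
--         'v': 1,
--         'c': 2,
--         'd': 3,
--     }
--     add_pos = [(c, attr_map[c]) for c in arg_str if c in attr_map and c != 'b']
--     add_pos.sort(key=lambda x: x[1])
--     return ''.join([c[0] for c in add_pos])
-- ===== SOURCE B (Python) =====
-- def sort_args(arg_str):
--     return ''.join(c for key in 'pvcd' for c in arg_str if c == key)
-- ===== Notes on version B (the rewrite author's own statement) =====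
-- stated objective: idiomatic
-- what changed: Replaced building tagged (char, priority) pairs and comparison-sorting them by a bucket pass: iterate the four fixed priority keys in order and emit the matching characters of arg_str for each key in order.
import Mathlib
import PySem

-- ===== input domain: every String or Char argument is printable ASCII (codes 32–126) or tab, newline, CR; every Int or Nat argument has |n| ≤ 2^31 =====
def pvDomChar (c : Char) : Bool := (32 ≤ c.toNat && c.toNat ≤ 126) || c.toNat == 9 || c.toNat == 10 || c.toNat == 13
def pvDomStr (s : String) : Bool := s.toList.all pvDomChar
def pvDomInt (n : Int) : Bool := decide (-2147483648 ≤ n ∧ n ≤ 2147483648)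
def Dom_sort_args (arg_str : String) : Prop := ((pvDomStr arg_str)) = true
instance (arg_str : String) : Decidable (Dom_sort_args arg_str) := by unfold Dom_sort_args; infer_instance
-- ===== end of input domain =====

-- B replaces A's tagged-pair building + comparison sort by a single bucket pass over the
-- fixed four-key priority alphabet (idiomatic; same return value).

-- ===== PORT A =====
-- attr_map = {'p': 0, 'v': 1, 'c': 2, 'd': 3}
def sortArgsAttrMap : PySem.Dict Char Int :=
  ((((PySem.Dict.empty).insert 'p' 0).insert 'v' 1).insert 'c' 2).insert 'd' 3

def sort_args (arg_str : String) : String :=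
  -- add_pos = [(c, attr_map[c]) for c in arg_str if c in attr_map and c != 'b']
  -- (attr_map[c] is guarded by 'c in attr_map', so the getD default is never used)
  let add_pos := arg_str.toList.foldl
    (fun acc c => if (sortArgsAttrMap.contains c && !(c == 'b')) = true
                  then acc ++ [(c, sortArgsAttrMap.getD c 0)] else acc) []
  -- add_pos.sort(key=lambda x: x[1])  (stable)
  let sortedPairs := PySem.List.sorted add_pos (fun x => x.2)
  -- ''.join([c[0] for c in add_pos])
  String.ofList (PySem.Chars.join [] (sortedPairs.map (fun p => [p.1])))

-- ===== PORT B =====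
def sort_args_alt (arg_str : String) : String :=
  -- ''.join(c for key in 'pvcd' for c in arg_str if c == key)
  String.ofList (PySem.Chars.join []
    ((['p', 'v', 'c', 'd'].flatMap
        (fun key => arg_str.toList.filter (fun c => c == key))).map (fun c => [c])))

-- ===== PRECONDITION & SPEC =====
def Spec_sort_args (arg_str : String) (out : String) : Prop := out = sort_args_alt arg_str
instance (arg_str : String) (out : String) : Decidable (Spec_sort_args arg_str out) := by unfold Spec_sort_args; infer_instance

-- ===== CLAIM (what is proved, stated in full; the proofs are below) =====
def Claim_equal_sort_args : Prop := ∀ (arg_str : String), Dom_sort_args arg_str → Spec_sort_args arg_str (sort_args arg_str)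

-- ===== LEMMAS AND PROOFS =====

-- inserting before every element puts x in front
theorem pv_insertBy_of_forall_before {α : Type} (before : α → α → Bool) (x : α)
    (ys : List α) (h : ∀ y ∈ ys, before x y = true) :
    PySem.List.insertBy before x ys = x :: ys := by
  cases ys with
  | nil => rfl
  | cons y ys => simp [PySem.List.insertBy, h y (by simp)]

-- insertBy passes over a prefix it does not insert into
theorem pv_insertBy_append_of_not_before {α : Type} (before : α → α → Bool) (x : α)
    (as bs : List α) (h : ∀ y ∈ as, before x y = false) :
    PySem.List.insertBy before x (as ++ bs) = as ++ PySem.List.insertBy before x bs := by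
  induction as with
  | nil => rfl
  | cons a as ih =>
    simp only [List.cons_append, PySem.List.insertBy, h a (by simp)]
    simp only [Bool.false_eq_true, if_false, List.cons.injEq, true_and]
    exact ih (fun y hy => h y (by simp [hy]))

-- the stable insertion-sort loop of A keeps the four buckets grouped in priority order
theorem pv_sort_args_invariant (xs A B C D : List Char)
    (hx : ∀ c ∈ xs, c = 'p' ∨ c = 'v' ∨ c = 'c' ∨ c = 'd') :
    xs.foldl
      (fun acc c => PySem.List.insertBy
        (fun a b : Char × Int => decide (a.2 < b.2)) (c, sortArgsAttrMap.getD c 0) acc)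
      (A.map (fun c => (c, (0 : Int))) ++ B.map (fun c => (c, (1 : Int)))
        ++ C.map (fun c => (c, (2 : Int))) ++ D.map (fun c => (c, (3 : Int))))
    = (A ++ xs.filter (· == 'p')).map (fun c => (c, (0 : Int)))
      ++ (B ++ xs.filter (· == 'v')).map (fun c => (c, (1 : Int)))
      ++ (C ++ xs.filter (· == 'c')).map (fun c => (c, (2 : Int)))
      ++ (D ++ xs.filter (· == 'd')).map (fun c => (c, (3 : Int))) := by
  induction xs generalizing A B C D with
  | nil => simp
  | cons c xs ih =>
    have hxs : ∀ c ∈ xs, c = 'p' ∨ c = 'v' ∨ c = 'c' ∨ c = 'd' :=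
      fun c hc => hx c (by simp [hc])
    have hmapA : ∀ y ∈ A.map (fun c => (c, (0 : Int))), (y.2 = 0) := by
      intro y hy; simp only [List.mem_map] at hy; obtain ⟨a, -, rfl⟩ := hy; rfl
    have hmapB : ∀ y ∈ B.map (fun c => (c, (1 : Int))), (y.2 = 1) := by
      intro y hy; simp only [List.mem_map] at hy; obtain ⟨a, -, rfl⟩ := hy; rfl
    have hmapC : ∀ y ∈ C.map (fun c => (c, (2 : Int))), (y.2 = 2) := by
      intro y hy; simp only [List.mem_map] at hy; obtain ⟨a, -, rfl⟩ := hy; rfl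
    have hmapD : ∀ y ∈ D.map (fun c => (c, (3 : Int))), (y.2 = 3) := by
      intro y hy; simp only [List.mem_map] at hy; obtain ⟨a, -, rfl⟩ := hy; rfl
    rcases hx c (by simp) with h | h | h | h <;> subst h <;>
      simp only [List.foldl_cons]
    · -- c = 'p' (key 0): passes bucket A (equal key), goes before B, C, D
      have h1 : PySem.List.insertBy (fun a b : Char × Int => decide (a.2 < b.2))
          ('p', sortArgsAttrMap.getD 'p' 0)
          (A.map (fun c => (c, (0 : Int))) ++ B.map (fun c => (c, (1 : Int)))
            ++ C.map (fun c => (c, (2 : Int))) ++ D.map (fun c => (c, (3 : Int))))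
        = (A ++ ['p']).map (fun c => (c, (0 : Int))) ++ B.map (fun c => (c, (1 : Int)))
            ++ C.map (fun c => (c, (2 : Int))) ++ D.map (fun c => (c, (3 : Int))) := by
        rw [List.append_assoc, List.append_assoc,
            pv_insertBy_append_of_not_before _ _ _ _
              (by intro y hy; rw [show ('p', sortArgsAttrMap.getD 'p' 0) = (('p', 0) : Char × Int) by decide]
                  simp [hmapA y hy]),
            pv_insertBy_of_forall_before _ _ _
              (by intro y hy
                  rw [show ('p', sortArgsAttrMap.getD 'p' 0) = (('p', 0) : Char × Int) by decide]
                  simp only [List.mem_append] at hy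
                  rcases hy with hy | hy | hy
                  · simp [hmapB y hy]
                  · simp [hmapC y hy]
                  · simp [hmapD y hy])]
        simp [show sortArgsAttrMap.getD 'p' 0 = (0 : Int) by decide]
      rw [h1, ih (A ++ ['p']) B C D hxs]
      simp [List.append_assoc]
    · -- c = 'v' (key 1): passes buckets A and B, goes before C, D
      have h1 : PySem.List.insertBy (fun a b : Char × Int => decide (a.2 < b.2))
          ('v', sortArgsAttrMap.getD 'v' 0)
          (A.map (fun c => (c, (0 : Int))) ++ B.map (fun c => (c, (1 : Int)))
            ++ C.map (fun c => (c, (2 : Int))) ++ D.map (fun c => (c, (3 : Int))))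
        = A.map (fun c => (c, (0 : Int))) ++ (B ++ ['v']).map (fun c => (c, (1 : Int)))
            ++ C.map (fun c => (c, (2 : Int))) ++ D.map (fun c => (c, (3 : Int))) := by
        rw [List.append_assoc, List.append_assoc, List.append_assoc,
            pv_insertBy_append_of_not_before _ _ _ _
              (by intro y hy; rw [show ('v', sortArgsAttrMap.getD 'v' 0) = (('v', 1) : Char × Int) by decide]
                  simp [hmapA y hy]),
            pv_insertBy_append_of_not_before _ _ _ _
              (by intro y hy; rw [show ('v', sortArgsAttrMap.getD 'v' 0) = (('v', 1) : Char × Int) by decide]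
                  simp [hmapB y hy]),
            pv_insertBy_of_forall_before _ _ _
              (by intro y hy
                  rw [show ('v', sortArgsAttrMap.getD 'v' 0) = (('v', 1) : Char × Int) by decide]
                  simp only [List.mem_append] at hy
                  rcases hy with hy | hy
                  · simp [hmapC y hy]
                  · simp [hmapD y hy])]
        simp [show sortArgsAttrMap.getD 'v' 0 = (1 : Int) by decide]
      rw [h1, ih A (B ++ ['v']) C D hxs]
      simp [List.append_assoc]
    · -- c = 'c' (key 2): passes buckets A, B, C, goes before D
      have h1 : PySem.List.insertBy (fun a b : Char × Int => decide (a.2 < b.2))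
          ('c', sortArgsAttrMap.getD 'c' 0)
          (A.map (fun c => (c, (0 : Int))) ++ B.map (fun c => (c, (1 : Int)))
            ++ C.map (fun c => (c, (2 : Int))) ++ D.map (fun c => (c, (3 : Int))))
        = A.map (fun c => (c, (0 : Int))) ++ B.map (fun c => (c, (1 : Int)))
            ++ (C ++ ['c']).map (fun c => (c, (2 : Int))) ++ D.map (fun c => (c, (3 : Int))) := by
        rw [List.append_assoc, List.append_assoc, List.append_assoc, List.append_assoc,
            pv_insertBy_append_of_not_before _ _ _ _
              (by intro y hy; rw [show ('c', sortArgsAttrMap.getD 'c' 0) = (('c', 2) : Char × Int) by decide]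
                  simp [hmapA y hy]),
            pv_insertBy_append_of_not_before _ _ _ _
              (by intro y hy; rw [show ('c', sortArgsAttrMap.getD 'c' 0) = (('c', 2) : Char × Int) by decide]
                  simp [hmapB y hy]),
            pv_insertBy_append_of_not_before _ _ _ _
              (by intro y hy; rw [show ('c', sortArgsAttrMap.getD 'c' 0) = (('c', 2) : Char × Int) by decide]
                  simp [hmapC y hy]),
            pv_insertBy_of_forall_before _ _ _
              (by intro y hy
                  rw [show ('c', sortArgsAttrMap.getD 'c' 0) = (('c', 2) : Char × Int) by decide]
                  simp [hmapD y hy])]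
        simp [show sortArgsAttrMap.getD 'c' 0 = (2 : Int) by decide]
      rw [h1, ih A B (C ++ ['c']) D hxs]
      simp [List.append_assoc]
    · -- c = 'd' (key 3): passes everything, lands at the end
      have h1 : PySem.List.insertBy (fun a b : Char × Int => decide (a.2 < b.2))
          ('d', sortArgsAttrMap.getD 'd' 0)
          (A.map (fun c => (c, (0 : Int))) ++ B.map (fun c => (c, (1 : Int)))
            ++ C.map (fun c => (c, (2 : Int))) ++ D.map (fun c => (c, (3 : Int))))
        = A.map (fun c => (c, (0 : Int))) ++ B.map (fun c => (c, (1 : Int)))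
            ++ C.map (fun c => (c, (2 : Int))) ++ (D ++ ['d']).map (fun c => (c, (3 : Int))) := by
        rw [PySem.List.insertBy_of_forall_not_before _ _ _
              (by intro y hy
                  rw [show ('d', sortArgsAttrMap.getD 'd' 0) = (('d', 3) : Char × Int) by decide]
                  simp only [List.mem_append] at hy
                  rcases hy with ((hy | hy) | hy) | hy
                  · simp [hmapA y hy]
                  · simp [hmapB y hy]
                  · simp [hmapC y hy]
                  · simp [hmapD y hy])]
        simp [show sortArgsAttrMap.getD 'd' 0 = (3 : Int) by decide]
      rw [h1, ih A B C (D ++ ['d']) hxs]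
      simp [List.append_assoc]

-- A's comprehension filter agrees with the single-key filters of B
theorem pv_filter_key (s : List Char) (k : Char) (hk : k = 'p' ∨ k = 'v' ∨ k = 'c' ∨ k = 'd') :
    (s.filter (fun c => sortArgsAttrMap.contains c && !(c == 'b'))).filter (· == k)
      = s.filter (· == k) := by
  rw [List.filter_filter]
  apply List.filter_congr
  intro c _
  by_cases h : c = k
  · subst h; rcases hk with h | h | h | h <;> subst h <;> decide
  · simp [h]

theorem sort_args_spec_aux (arg_str : String) :
    sort_args arg_str = sort_args_alt arg_str := by
  unfold sort_args sort_args_alt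
  simp only [PySem.List.foldl_append_if, List.nil_append]
  rw [PySem.List.sorted_eq_foldl_insertBy, List.foldl_map]
  have hx : ∀ c ∈ arg_str.toList.filter
      (fun c => sortArgsAttrMap.contains c && !(c == 'b')),
      c = 'p' ∨ c = 'v' ∨ c = 'c' ∨ c = 'd' := by
    intro c hc
    have := (List.mem_filter.mp hc).2
    by_cases h1 : c = 'p'; · exact Or.inl h1
    by_cases h2 : c = 'v'; · exact Or.inr (Or.inl h2)
    by_cases h3 : c = 'c'; · exact Or.inr (Or.inr (Or.inl h3))
    by_cases h4 : c = 'd'; · exact Or.inr (Or.inr (Or.inr h4))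
    exfalso
    simp [sortArgsAttrMap, PySem.Dict.contains_insert, PySem.Dict.contains_empty,
      h1, h2, h3, h4] at this
  have := pv_sort_args_invariant
    (arg_str.toList.filter (fun c => sortArgsAttrMap.contains c && !(c == 'b')))
    [] [] [] [] hx
  simp only [List.nil_append, List.map_nil] at this
  rw [this]
  simp only [List.map_append, List.map_map, List.flatMap_cons, List.flatMap_nil,
    List.append_nil]
  rw [pv_filter_key _ _ (by tauto), pv_filter_key _ _ (by tauto),
      pv_filter_key _ _ (by tauto), pv_filter_key _ _ (by tauto)]
  simp [Function.comp_def]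

-- ===== VERDICT (by name: the statement is the Claim_ definition above) =====
theorem sort_args_spec : Claim_equal_sort_args := by
  intro arg_str _
  exact sort_args_spec_aux arg_str
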